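-- pv_equiv track=rewrite | github.com/vivardhan/podcast-gpt | data_api/qa_generator/transcript_chapterizer.py | convert_timestamp_string_to_milliseconds
-- ===== SOURCE A (Python) =====
-- def convert_timestamp_string_to_milliseconds(timestamp_string: str) -> int:
-- 	"""
-- 	Converts a timestamp string to milliseconds
--
-- 	params:
-- 		timestamp_str:
-- 			The timestamp in hh:mm:ss format, possibly truncated, eg:
-- 			02:34:27,
-- 			00:23:17,
-- 			2:45,
-- 			3:23:51.
--
-- 	returns:
-- 		The timestamp in milliseconds
-- 	"""
-- 	parts = timestamp_string.split(':')
-- 	assert len(parts) <= 3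
--
-- 	conversion_factor = 1000
-- 	milliseconds = 0
-- 	for part in reversed(parts):
-- 		milliseconds += conversion_factor * int(part)
-- 		conversion_factor *= 60
--
-- 	return milliseconds
-- ===== SOURCE B (Python) =====
-- def convert_timestamp_string_to_milliseconds(timestamp_string: str) -> int:
-- 	parts = timestamp_string.split(':')
-- 	assert len(parts) <= 3
-- 	h, m, s = ['0'] * (3 - len(parts)) + parts
-- 	return (3600 * int(h) + 60 * int(m) + int(s)) * 1000
-- ===== Notes on version B (the rewrite author's own statement) =====
-- stated objective: simpler
-- what changed: Removes the loop entirely: pads the split parts to exactly three fields ('0' on the left) and returns the closed-form (3600*h + 60*m + s)*1000 instead of iterating with a growing conversion_factor accumulator.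
import Mathlib
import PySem

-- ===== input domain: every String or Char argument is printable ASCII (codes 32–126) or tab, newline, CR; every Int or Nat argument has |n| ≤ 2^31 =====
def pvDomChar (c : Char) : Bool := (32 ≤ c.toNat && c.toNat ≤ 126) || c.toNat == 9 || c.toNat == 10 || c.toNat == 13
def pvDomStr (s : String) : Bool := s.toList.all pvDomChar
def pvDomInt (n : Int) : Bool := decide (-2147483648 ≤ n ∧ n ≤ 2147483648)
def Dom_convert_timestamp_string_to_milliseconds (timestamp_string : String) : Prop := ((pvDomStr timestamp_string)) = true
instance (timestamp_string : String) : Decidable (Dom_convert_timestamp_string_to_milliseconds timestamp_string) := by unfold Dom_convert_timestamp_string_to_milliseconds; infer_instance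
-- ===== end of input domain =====

-- B removes the loop: it pads the split parts to exactly three fields ('0' on the left)
-- and returns the closed-form (3600*h + 60*m + s)*1000; objective: simpler.


-- ===== PORT A =====
-- for part in reversed(parts): milliseconds += conversion_factor * int(part); conversion_factor *= 60
-- state = (milliseconds, conversion_factor); int(part) via PySem.Int.ofStr? (none excluded by Pre_)
def convert_timestamp_string_to_milliseconds (timestamp_string : String) : Int :=
  let parts := (PySem.Str.split? timestamp_string ":").getD []
  let r := parts.reverse.foldl
    (fun (st : Int × Int) part => (st.1 + st.2 * ((PySem.Int.ofStr? part).getD 0), st.2 * 60))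
    (0, 1000)
  r.1

-- ===== PORT B =====
-- h, m, s = ['0'] * (3 - len(parts)) + parts; return (3600*int(h) + 60*int(m) + int(s)) * 1000
-- the match default is unreachable: split always yields 1–3 parts under Pre_, so padding gives 3
def convert_timestamp_string_to_milliseconds_alt (timestamp_string : String) : Int :=
  let parts := (PySem.Str.split? timestamp_string ":").getD []
  match List.replicate (3 - parts.length) "0" ++ parts with
  | [h, m, s] =>
      (3600 * (PySem.Int.ofStr? h).getD 0 + 60 * (PySem.Int.ofStr? m).getD 0
        + (PySem.Int.ofStr? s).getD 0) * 1000
  | _ => 0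

-- ===== PRECONDITION & SPEC =====
-- Pre_ excludes exactly the inputs where Python A raises: more than three colon-separated parts
-- (AssertionError) or a part that is not a valid int literal (ValueError from int(part)).
def Pre_convert_timestamp_string_to_milliseconds (timestamp_string : String) : Prop :=
  ((PySem.Str.split? timestamp_string ":").getD []).length ≤ 3 ∧
  (((PySem.Str.split? timestamp_string ":").getD []).all (fun p => (PySem.Int.ofStr? p).isSome)) = true
instance (timestamp_string : String) : Decidable (Pre_convert_timestamp_string_to_milliseconds timestamp_string) := by unfold Pre_convert_timestamp_string_to_milliseconds; infer_instance

def pvWitness_convert_timestamp_string_to_milliseconds : String := "2:34:27"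

def Spec_convert_timestamp_string_to_milliseconds (timestamp_string : String) (out : Int) : Prop := out = convert_timestamp_string_to_milliseconds_alt timestamp_string
instance (timestamp_string : String) (out : Int) : Decidable (Spec_convert_timestamp_string_to_milliseconds timestamp_string out) := by unfold Spec_convert_timestamp_string_to_milliseconds; infer_instance

-- ===== CLAIM (what is proved, stated in full; the proofs are below) =====
def Claim_equal_convert_timestamp_string_to_milliseconds : Prop := ∀ (timestamp_string : String), Dom_convert_timestamp_string_to_milliseconds timestamp_string → Pre_convert_timestamp_string_to_milliseconds timestamp_string → Spec_convert_timestamp_string_to_milliseconds timestamp_string (convert_timestamp_string_to_milliseconds timestamp_string)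

-- ===== LEMMAS AND PROOFS =====
-- int('0') = 0, used for the padded fields
theorem pv_zero : ((PySem.Int.ofStr? "0").getD 0 : Int) = 0 := by decide

-- With ≤ 3 parts, case analysis on the list shape closes each case by arithmetic.
theorem pv_key (l : List String) (h : l.length ≤ 3) :
    (l.reverse.foldl
        (fun (st : Int × Int) part => (st.1 + st.2 * ((PySem.Int.ofStr? part).getD 0), st.2 * 60))
        (0, 1000)).1
    = (match List.replicate (3 - l.length) "0" ++ l with
       | [h, m, s] =>
           (3600 * (PySem.Int.ofStr? h).getD 0 + 60 * (PySem.Int.ofStr? m).getD 0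
             + (PySem.Int.ofStr? s).getD 0) * 1000
       | _ => 0) := by
  match l, h with
  | [], _ => simp [List.replicate, pv_zero]
  | [a], _ => simp [List.replicate, pv_zero, List.foldl]; ring
  | [a, b], _ => simp [pv_zero, List.foldl]; ring
  | [a, b, c], _ => simp [List.foldl]; ring
  | a :: b :: c :: d :: t, h => simp at h; omega

-- ===== VERDICT (by name: the statement is the Claim_ definition above) =====
theorem convert_timestamp_string_to_milliseconds_spec : Claim_equal_convert_timestamp_string_to_milliseconds := by
  intro s _ hpre
  unfold Spec_convert_timestamp_string_to_milliseconds
  unfold convert_timestamp_string_to_milliseconds convert_timestamp_string_to_milliseconds_alt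
  exact pv_key _ hpre.1
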